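-- pv_equiv track=rewrite | github.com/Tectonius/02-251-final-project | f_scoring.py | computeGapIntervals
-- ===== SOURCE A (Python) =====
-- def computeGapIntervals(sequence):
--     gap_list = set()
--     cur_gap = []
--     for i in range(len(sequence)):
--         if sequence[i] == '-' and len(cur_gap)==0:
--             cur_gap.append(i)
--         elif sequence[i] != '-' and len(cur_gap)==1:
--             gap_list.add((cur_gap[0], i))
--             cur_gap = []
--     if len(cur_gap) != 0:
--         gap_list.add((cur_gap[0], len(sequence)))
--     return gap_list
-- ===== SOURCE B (Python) =====
-- def computeGapIntervals(sequence):
--     # Run-length scan: skip over each maximal run of equal characters at once,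
--     # recording the run's (start, end) when the run character is '-'.
--     gaps = set()
--     n = len(sequence)
--     idx = 0
--     while idx < n:
--         j = idx
--         while j < n and sequence[j] == sequence[idx]:
--             j += 1
--         if sequence[idx] == '-':
--             gaps.add((idx, j))
--         idx = j
--     return gaps
-- ===== Notes on version B (the rewrite author's own statement) =====
-- stated objective: alternative
-- what changed: Replaces A's open/close flag state machine (cur_gap list plus a post-loop flush) with a run-length scan that skips each maximal run of equal characters at once and records the run's start and end when the run consists of gap characters.
import Mathlib
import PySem

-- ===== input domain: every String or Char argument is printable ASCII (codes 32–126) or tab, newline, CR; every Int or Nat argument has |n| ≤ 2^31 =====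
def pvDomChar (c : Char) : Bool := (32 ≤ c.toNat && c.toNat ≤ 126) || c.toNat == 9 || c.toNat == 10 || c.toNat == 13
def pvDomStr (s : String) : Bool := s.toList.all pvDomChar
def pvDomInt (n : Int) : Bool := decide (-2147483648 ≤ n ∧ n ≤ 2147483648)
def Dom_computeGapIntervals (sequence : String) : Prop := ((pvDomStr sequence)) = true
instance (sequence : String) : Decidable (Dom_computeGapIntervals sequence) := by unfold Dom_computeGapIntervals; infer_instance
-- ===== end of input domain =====

-- B replaces A's open/close flag state machine with a run-length scan over maximal runs; same cost, different decomposition.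

-- ===== PORT A =====
-- literal transliteration of A: index loop over range(len(sequence)) with state (gap_list, cur_gap)
def computeGapIntervals (sequence : String) : List (Int × Int) :=
  let s := sequence.toList
  let r := (PySem.List.pyRange 0 (PySem.Str.len sequence) 1).foldl
    (fun (st : PySem.Set (Int × Int) × List Int) i =>
      if PySem.List.pyGetD s i ' ' == '-' && st.2.length == 0 then
        (st.1, st.2 ++ [i])
      else if !(PySem.List.pyGetD s i ' ' == '-') && st.2.length == 1 then
        (PySem.Set.add st.1 (PySem.List.pyGetD st.2 0 0, i), [])
      else st)
    (PySem.Set.empty, [])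
  if r.2.length ≠ 0 then
    PySem.Set.add r.1 (PySem.List.pyGetD r.2 0 0, PySem.Str.len sequence)
  else r.1

-- ===== PORT B =====
-- transliteration of Source B's outer while: each step consumes one maximal run (the inner while = takeWhile/dropWhile scan)
def computeGapIntervalsAltGo (l : List Char) (idx : Int) (acc : PySem.Set (Int × Int)) :
    List (Int × Int) :=
  match l with
  | [] => acc
  | c :: rest =>
    let n : Int := 1 + (rest.takeWhile (fun d => d == c)).length
    if c == '-' then
      computeGapIntervalsAltGo (rest.dropWhile (fun d => d == c)) (idx + n)
        (PySem.Set.add acc (idx, idx + n))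
    else
      computeGapIntervalsAltGo (rest.dropWhile (fun d => d == c)) (idx + n) acc
termination_by l.length
decreasing_by
  all_goals
    simp only [List.length_cons]
    have := List.length_dropWhile_le (fun d => d == c) rest
    omega

def computeGapIntervals_alt (sequence : String) : List (Int × Int) :=
  computeGapIntervalsAltGo sequence.toList 0 PySem.Set.empty

-- ===== PRECONDITION & SPEC =====
def Spec_computeGapIntervals (sequence : String) (out : List (Int × Int)) : Prop := out = computeGapIntervals_alt sequence
instance (sequence : String) (out : List (Int × Int)) : Decidable (Spec_computeGapIntervals sequence out) := by unfold Spec_computeGapIntervals; infer_instance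

-- ===== CLAIM (what is proved, stated in full; the proofs are below) =====
def Claim_equal_computeGapIntervals : Prop := ∀ (sequence : String), Dom_computeGapIntervals sequence → Spec_computeGapIntervals sequence (computeGapIntervals sequence)

-- ===== LEMMAS AND PROOFS =====

-- A's loop body as a step on (index, char) pairs
def aStep (st : PySem.Set (Int × Int) × List Int) (p : Int × Char) :
    PySem.Set (Int × Int) × List Int :=
  if p.2 == '-' && st.2.length == 0 then
    (st.1, st.2 ++ [p.1])
  else if !(p.2 == '-') && st.2.length == 1 then
    (PySem.Set.add st.1 (PySem.List.pyGetD st.2 0 0, p.1), [])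
  else st

-- A's post-loop flush
def aFlush (st : PySem.Set (Int × Int) × List Int) (e : Int) : List (Int × Int) :=
  if st.2.length ≠ 0 then PySem.Set.add st.1 (PySem.List.pyGetD st.2 0 0, e) else st.1

theorem aStep_gap_open (g : PySem.Set (Int × Int)) (j i : Int) :
    aStep (g, [j]) (i, '-') = (g, [j]) := by
  simp [aStep]

theorem aStep_nongap_closed (g : PySem.Set (Int × Int)) (i : Int) (c : Char) (hc : ¬ c = '-') :
    aStep (g, []) (i, c) = (g, []) := by
  simp [aStep, hc]

-- fold over a run of '-' with an open gap: state unchanged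
theorem fold_gap_run (t : List Char) (ht : ∀ c ∈ t, c = '-') :
    ∀ (i : Int) (g : PySem.Set (Int × Int)) (j : Int),
    (PySem.List.enumerate t i).foldl aStep (g, [j]) = (g, [j]) := by
  induction t with
  | nil => intro i g j; simp [PySem.List.enumerate_nil]
  | cons c rest ih =>
    intro i g j
    have hc : c = '-' := ht c (by simp)
    rw [PySem.List.enumerate_cons, List.foldl_cons, hc, aStep_gap_open]
    exact ih (fun d hd => ht d (by simp [hd])) _ _ _

-- fold over a run of non-'-' chars with no open gap: state unchanged
theorem fold_nongap_run (t : List Char) (ht : ∀ c ∈ t, ¬ c = '-') :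
    ∀ (i : Int) (g : PySem.Set (Int × Int)),
    (PySem.List.enumerate t i).foldl aStep (g, []) = (g, []) := by
  induction t with
  | nil => intro i g; simp [PySem.List.enumerate_nil]
  | cons c rest ih =>
    intro i g
    rw [PySem.List.enumerate_cons, List.foldl_cons,
      aStep_nongap_closed g i c (ht c (by simp))]
    exact ih (fun d hd => ht d (by simp [hd])) _ _

-- B also skips a leading non-gap character one position at a time
theorem altGo_cons_nongap (l : List Char) (idx : Int) (acc : PySem.Set (Int × Int))
    (d : Char) (hd : ¬ d = '-') :
    computeGapIntervalsAltGo (d :: l) idx acc = computeGapIntervalsAltGo l (idx + 1) acc := by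
  have hdb : (d == '-') = false := by simp [hd]
  match l with
  | [] =>
    rw [computeGapIntervalsAltGo]
    simp [computeGapIntervalsAltGo, hdb]
  | e :: r =>
    by_cases he : e = d
    · rw [he]
      have hpd : (d == d) = true := by simp
      conv_lhs => rw [computeGapIntervalsAltGo]
      simp only [List.takeWhile_cons, List.dropWhile_cons, hpd, if_true, List.length_cons,
        hdb, Bool.false_eq_true, if_false]
      conv_rhs => rw [computeGapIntervalsAltGo]
      simp only [hdb, Bool.false_eq_true, if_false]
      congr 1
      push_cast
      ring
    · have hpe : (e == d) = false := by simp [he]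
      rw [computeGapIntervalsAltGo]
      simp only [List.takeWhile_cons, List.dropWhile_cons, hpe, Bool.false_eq_true, if_false,
        List.length_nil, hdb]
      norm_num

-- head of dropWhile fails the predicate
theorem dropWhile_head_false (p : Char → Bool) (l : List Char) (d : Char) (r : List Char)
    (h : l.dropWhile p = d :: r) : p d = false := by
  have := List.dropWhile_get_zero_not p l (by simp [h])
  simpa [h] using this

-- main invariant: flushing A's fold over any suffix equals B's run scan
theorem main_inv : ∀ (l : List Char) (i : Int) (g : PySem.Set (Int × Int)),
    aFlush ((PySem.List.enumerate l i).foldl aStep (g, [])) (i + l.length) =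
      computeGapIntervalsAltGo l i g
  | [], i, g => by
    simp [PySem.List.enumerate_nil, aFlush, computeGapIntervalsAltGo]
  | c :: rest, i, g => by
    have hsplit : rest = rest.takeWhile (fun d => d == c) ++ rest.dropWhile (fun d => d == c) :=
      (List.takeWhile_append_dropWhile).symm
    have htmem : ∀ d ∈ rest.takeWhile (fun d => d == c), d = c := fun d hd => by
      have := List.mem_takeWhile_imp hd; simpa using this
    have henum : PySem.List.enumerate (c :: rest) i
        = (i, c) :: (PySem.List.enumerate (rest.takeWhile (fun d => d == c)) (i+1)
            ++ PySem.List.enumerate (rest.dropWhile (fun d => d == c))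
                (i+1+((rest.takeWhile (fun d => d == c)).length : Int))) := by
      rw [PySem.List.enumerate_cons]
      conv_lhs => rw [hsplit]
      rw [PySem.List.enumerate_append]
    have hlen : i + (((c :: rest).length : Int))
        = i + 1 + ((rest.takeWhile (fun d => d == c)).length : Int)
            + ((rest.dropWhile (fun d => d == c)).length : Int) := by
      conv_lhs => rw [hsplit]
      push_cast [List.length_cons, List.length_append]
      ring
    by_cases hc : c = '-'
    · subst hc
      have hstep1 : aStep (g, ([] : List Int)) (i, '-') = (g, [i]) := by simp [aStep]
      rw [henum, List.foldl_cons, hstep1, List.foldl_append, fold_gap_run _ htmem (i+1) g i]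
      conv_rhs => rw [computeGapIntervalsAltGo]
      rw [if_pos (by simp : ('-' == '-') = true)]
      cases hr'' : List.dropWhile (fun d => d == '-') rest with
      | nil =>
        rw [hr''] at hlen
        simp only [PySem.List.enumerate_nil, List.foldl_nil, computeGapIntervalsAltGo, aFlush]
        norm_num [PySem.List.pyGetD, PySem.List.pyGet?, PySem.List.pyIdx?]
        have hrl : ((rest.length : Int)) = ((rest.takeWhile (fun d => d == '-')).length : Int) := by
          conv_lhs => rw [hsplit, hr'']
          simp
        have hxy : i + ((rest.length : Int) + 1)
            = i + (1 + ((rest.takeWhile (fun d => d == '-')).length : Int)) := by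
          rw [hrl]; ring
        rw [hxy]
      | cons d r'' =>
        rw [hr''] at hlen
        have hd : ¬ d = '-' := by
          simpa using dropWhile_head_false (fun d => d == '-') rest d r'' hr''
        have hstep2 : aStep (g, [i])
              (i+1+((rest.takeWhile (fun d => d == '-')).length : Int), d)
            = (PySem.Set.add g (i, i+1+((rest.takeWhile (fun d => d == '-')).length : Int)),
                []) := by
          simp [aStep, hd, PySem.List.pyGetD, PySem.List.pyGet?, PySem.List.pyIdx?]
        rw [PySem.List.enumerate_cons, List.foldl_cons, hstep2]
        have hE : i + ((('-') :: rest).length : Int)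
            = (i+1+((rest.takeWhile (fun d => d == '-')).length : Int)+1)
                + (r''.length : Int) := by
          rw [hlen]; push_cast [List.length_cons]; ring
        rw [hE, main_inv r'' _ _, altGo_cons_nongap r'' _ _ d hd]
        have hB : i + 1 + ((rest.takeWhile (fun d => d == '-')).length : Int)
            = i + (1 + ((rest.takeWhile (fun d => d == '-')).length : Int)) := by ring
        rw [hB]
    · have hcb : (c == '-') = false := by simp [hc]
      rw [henum, List.foldl_cons, aStep_nongap_closed g i c hc, List.foldl_append,
        fold_nongap_run _ (fun d hd => by rw [htmem d hd]; exact hc) (i+1) g]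
      conv_rhs => rw [computeGapIntervalsAltGo]
      simp only [hcb, Bool.false_eq_true, if_false]
      rw [hlen, main_inv (List.dropWhile (fun d => d == c) rest) _ g]
      have hB : i + 1 + ((rest.takeWhile (fun d => d == c)).length : Int)
          = i + (1 + ((rest.takeWhile (fun d => d == c)).length : Int)) := by ring
      rw [hB]
termination_by l => l.length
decreasing_by
  · have h1 := List.length_dropWhile_le (fun d => d == '-') rest
    rw [hr''] at h1
    simp only [List.length_cons] at h1 ⊢
    omega
  · have h1 := List.length_dropWhile_le (fun d => d == c) rest
    simp only [List.length_cons]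
    omega

-- ===== VERDICT (by name: the statement is the Claim_ definition above) =====
theorem computeGapIntervals_spec : Claim_equal_computeGapIntervals := by
  intro sequence _
  unfold Spec_computeGapIntervals computeGapIntervals_alt
  have key : computeGapIntervals sequence
      = aFlush ((PySem.List.pyRange 0 (PySem.Str.len sequence) 1).foldl
          (fun st i => aStep st (i, PySem.List.pyGetD sequence.toList i ' '))
          (PySem.Set.empty, [])) (PySem.Str.len sequence) := rfl
  rw [key]
  have h2 := main_inv sequence.toList 0 PySem.Set.empty
  rw [PySem.List.enumerate_eq_map_pyRange sequence.toList ' ', List.foldl_map] at h2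
  simp only [zero_add] at h2
  have hlen1 : PySem.Str.len sequence = PySem.List.len sequence.toList := by
    simp [PySem.Str.len_eq, PySem.List.len_eq]
  have hlen2 : PySem.List.len sequence.toList = ((sequence.toList.length : Nat) : Int) := by
    simp [PySem.List.len_eq]
  rw [hlen1, hlen2]
  rw [hlen2] at h2
  exact h2
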